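-- pv_equiv track=rewrite | github.com/muroc-aero/the-hangar | packages/omd/src/hangar/omd/plan_review.py | _section_matches
-- ===== SOURCE A (Python) =====
-- def _section_matches(section: str, text: str) -> bool:
--     text = text.lower()
--     if section == "mesh":
--         return any(token in text for token in ("mesh", "num_y", "num_x"))
--     if section == "design_variables":
--         return "design_variables" in text or "dv_setup" in text or "dv_" in text
--     if section == "constraints":
--         return "constraint" in text
--     if section == "objective":
--         return "objective" in text
--     if section == "solvers":
--         return "solver" in text
--     if section == "optimizer":
--         return "optimizer" in text
--     return False
-- ===== SOURCE B (Python) =====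
-- # (keyword, section) rules; B classifies the text into all matching sections, then tests membership.
-- _RULES = (
--     ("mesh", "mesh"),
--     ("num_y", "mesh"),
--     ("num_x", "mesh"),
--     ("design_variables", "design_variables"),
--     ("dv_setup", "design_variables"),
--     ("dv_", "design_variables"),
--     ("constraint", "constraints"),
--     ("objective", "objective"),
--     ("solver", "solvers"),
--     ("optimizer", "optimizer"),
-- )
--
--
-- def _section_matches(section: str, text: str) -> bool:
--     text = text.lower()
--     matched = {sec for tok, sec in _RULES if tok in text}
--     return section in matched
-- ===== Notes on version B (the rewrite author's own statement) =====
-- stated objective: alternative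
-- what changed: Inverts the control flow: instead of branching on the section name and then testing its keywords, B scans one flat (keyword, section) rule list over the text, builds the set of all matching sections, and answers by set membership.
import Mathlib
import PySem

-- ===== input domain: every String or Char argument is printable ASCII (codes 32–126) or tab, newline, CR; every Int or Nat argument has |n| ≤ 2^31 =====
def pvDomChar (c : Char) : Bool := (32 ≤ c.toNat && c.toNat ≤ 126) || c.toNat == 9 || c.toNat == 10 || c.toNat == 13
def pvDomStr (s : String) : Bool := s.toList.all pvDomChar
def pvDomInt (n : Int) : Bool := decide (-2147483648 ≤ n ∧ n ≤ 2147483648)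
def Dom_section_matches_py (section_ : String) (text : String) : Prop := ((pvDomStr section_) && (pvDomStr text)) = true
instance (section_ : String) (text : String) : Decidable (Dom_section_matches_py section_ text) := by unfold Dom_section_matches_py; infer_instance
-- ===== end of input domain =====

-- B inverts the control flow: it builds the set of all sections whose keywords occur in the text, then answers by membership (alternative decomposition, same cost).


-- ===== PORT A =====
def section_matches_py (section_ : String) (text : String) : Bool :=
  let text := PySem.Str.lower text
  if section_ == "mesh" then
    ["mesh", "num_y", "num_x"].any (fun token => PySem.Str.isIn token text)
  else if section_ == "design_variables" then
    PySem.Str.isIn "design_variables" text || PySem.Str.isIn "dv_setup" text || PySem.Str.isIn "dv_" text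
  else if section_ == "constraints" then
    PySem.Str.isIn "constraint" text
  else if section_ == "objective" then
    PySem.Str.isIn "objective" text
  else if section_ == "solvers" then
    PySem.Str.isIn "solver" text
  else if section_ == "optimizer" then
    PySem.Str.isIn "optimizer" text
  else
    false

-- ===== PORT B =====
-- flat (keyword, section) rule list
def pvRules : List (String × String) :=
  [("mesh", "mesh"), ("num_y", "mesh"), ("num_x", "mesh"),
   ("design_variables", "design_variables"), ("dv_setup", "design_variables"), ("dv_", "design_variables"),
   ("constraint", "constraints"), ("objective", "objective"),
   ("solver", "solvers"), ("optimizer", "optimizer")]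

def section_matches_py_alt (section_ : String) (text : String) : Bool :=
  let text := PySem.Str.lower text
  let matched : PySem.Set String :=
    PySem.Set.ofList ((pvRules.filter (fun p => PySem.Str.isIn p.1 text)).map Prod.snd)
  PySem.Set.contains matched section_

-- ===== PRECONDITION & SPEC =====
def Spec_section_matches_py (section_ : String) (text : String) (out : Bool) : Prop := out = section_matches_py_alt section_ text
instance (section_ : String) (text : String) (out : Bool) : Decidable (Spec_section_matches_py section_ text out) := by unfold Spec_section_matches_py; infer_instance

-- ===== CLAIM (what is proved, stated in full; the proofs are below) =====
def Claim_equal_section_matches_py : Prop := ∀ (section_ : String) (text : String), Dom_section_matches_py section_ text → Spec_section_matches_py section_ text (section_matches_py section_ text)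

-- ===== LEMMAS AND PROOFS =====

-- membership in the deduplicated matched-section set ignores the dedup
theorem pv_contains_ofList (m : List String) (a : String) :
    PySem.Set.contains (PySem.Set.ofList m) a = decide (a ∈ m) := by
  by_cases h : a ∈ m <;>
    simp [PySem.Set.mem_ofList, h]

-- membership in the matched-section set = some rule with this section fires
theorem pv_contains_ofList_map_filter (l : List (String × String)) (p : String × String → Bool) (a : String) :
    PySem.Set.contains (PySem.Set.ofList ((l.filter p).map Prod.snd)) a
      = l.any (fun x => p x && (x.2 == a)) := by
  rw [pv_contains_ofList]
  induction l with
  | nil => rfl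
  | cons x xs ih =>
    rw [List.any_cons, ← ih, List.filter_cons]
    by_cases hp : p x = true
    · rw [if_pos hp, hp, Bool.true_and, List.map_cons]
      by_cases hm : x.2 = a
      · subst hm; simp [List.mem_cons]
      · have hb1 : (a == x.2) = false := beq_eq_false_iff_ne.mpr (Ne.symm hm)
        have hb2 : (x.2 == a) = false := beq_eq_false_iff_ne.mpr hm
        simp [List.mem_cons, hm, Ne.symm hm, hb1, hb2]
    · simp [hp]

-- ===== VERDICT (by name: the statement is the Claim_ definition above) =====
theorem section_matches_py_spec : Claim_equal_section_matches_py := by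
  intro section_ text _
  unfold Spec_section_matches_py section_matches_py section_matches_py_alt
  rw [pv_contains_ofList_map_filter]
  by_cases h1 : section_ = "mesh"
  · subst h1; simp [pvRules]
  by_cases h2 : section_ = "design_variables"
  · subst h2; simp [pvRules, Bool.or_assoc]
  by_cases h3 : section_ = "constraints"
  · subst h3; simp [pvRules]
  by_cases h4 : section_ = "objective"
  · subst h4; simp [pvRules]
  by_cases h5 : section_ = "solvers"
  · subst h5; simp [pvRules]
  by_cases h6 : section_ = "optimizer"
  · subst h6; simp [pvRules]
  simp [pvRules, h1, h2, h3, h4, h5, h6, Ne.symm h1, Ne.symm h2, Ne.symm h3, Ne.symm h4,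
        Ne.symm h5, Ne.symm h6]
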